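-- pv_equiv track=rewrite | github.com/X-v2/oasis | parser/walls.py | _absorb_short_edge_runs
-- ===== SOURCE A (Python) =====
-- def _absorb_short_edge_runs(
--     runs: list[tuple[int, int, bool]],
--     edge_threshold: int,
-- ) -> list[tuple[int, int, bool]]:
--     if len(runs) <= 1:
--         return runs
--
--     adjusted = list(runs)
--     if len(adjusted) >= 2 and adjusted[0][1] - adjusted[0][0] < edge_threshold:
--         _, _, next_state = adjusted[1]
--         if not adjusted[0][2] and next_state:
--             adjusted[0] = (adjusted[0][0], adjusted[0][1], next_state)
--     if len(adjusted) >= 2 and adjusted[-1][1] - adjusted[-1][0] < edge_threshold: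
--         prev_state = adjusted[-2][2]
--         if not adjusted[-1][2] and prev_state:
--             adjusted[-1] = (adjusted[-1][0], adjusted[-1][1], prev_state)
--
--     collapsed: list[tuple[int, int, bool]] = []
--     for start, end, state in adjusted:
--         if collapsed and collapsed[-1][2] == state and start <= collapsed[-1][1]:
--             prev_start, prev_end, prev_state = collapsed[-1]
--             collapsed[-1] = (prev_start, max(prev_end, end), prev_state)
--             continue
--         if collapsed and collapsed[-1][2] == state:
--             prev_start, prev_end, prev_state = collapsed[-1]
--             collapsed[-1] = (prev_start, end, prev_state)
--             continue
--         collapsed.append((start, end, state))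
--     return collapsed
-- ===== SOURCE B (Python) =====
-- def _absorb_short_edge_runs(runs, edge_threshold):
--     if len(runs) <= 1:
--         return runs
--
--     def promote_head(xs):
--         # promote a short leading False run to its neighbour's True state
--         (s, e, st), nst = xs[0], xs[1][2]
--         if e - s < edge_threshold and not st and nst:
--             return [(s, e, nst)] + xs[1:]
--         return xs
--
--     # fix the first run, then (via reversal) the last run symmetric-wise
--     adjusted = promote_head(runs)
--     adjusted = promote_head(adjusted[::-1])[::-1]
--
--     # collapse by rewriting the list in place: splice every adjacent
--     # same-state pair into one run until none is left
--     i = 0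
--     while i + 1 < len(adjusted):
--         s1, e1, st1 = adjusted[i]
--         s2, e2, st2 = adjusted[i + 1]
--         if st1 == st2:
--             adjusted[i:i + 2] = [(s1, max(e1, e2) if s2 <= e1 else e2, st1)]
--         else:
--             i += 1
--     return adjusted
-- ===== Notes on version B (the rewrite author's own statement) =====
-- stated objective: alternative
-- what changed: Replaced A's two inline first/last index mutations with one head-promotion helper applied twice via list reversal, and A's accumulator loop that appends and patches collapsed[-1] with an in-place splice loop that rewrites each adjacent same-state pair of the working list where it stands.
import Mathlib
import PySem

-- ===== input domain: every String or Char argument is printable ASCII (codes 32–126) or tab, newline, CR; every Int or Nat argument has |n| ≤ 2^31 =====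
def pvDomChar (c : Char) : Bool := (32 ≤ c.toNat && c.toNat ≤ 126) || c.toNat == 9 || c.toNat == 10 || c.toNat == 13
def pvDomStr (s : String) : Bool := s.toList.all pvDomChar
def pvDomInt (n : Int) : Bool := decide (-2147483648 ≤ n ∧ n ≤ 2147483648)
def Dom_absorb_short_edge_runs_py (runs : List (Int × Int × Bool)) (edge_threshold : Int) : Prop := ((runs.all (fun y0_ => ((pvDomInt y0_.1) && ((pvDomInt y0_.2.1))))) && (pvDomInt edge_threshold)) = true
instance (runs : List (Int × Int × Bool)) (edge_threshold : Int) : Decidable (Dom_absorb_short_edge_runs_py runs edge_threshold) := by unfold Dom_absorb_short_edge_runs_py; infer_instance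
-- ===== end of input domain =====

-- B replaces A's two inline index fix-ups by one head-promotion helper applied twice through
-- list reversal, and A's append-and-patch-last accumulator loop by an in-place splice loop
-- that rewrites every adjacent same-state pair where it stands; same cost (alternative).

-- ===== PORT A =====
-- adjusted[0] fix-up: combines Python's outer (length/threshold) and inner (state) ifs
def adjustFirstA (t : Int) : List (Int × Int × Bool) → List (Int × Int × Bool)
  | (s, e, st) :: (s2, e2, st2) :: rest =>
      if e - s < t ∧ st = false ∧ st2 = true then
        (s, e, st2) :: (s2, e2, st2) :: rest
      else (s, e, st) :: (s2, e2, st2) :: rest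
  | xs => xs

-- adjusted[-1] fix-up: walk to the last two elements (Python's negative indexing)
def adjustLastA (t : Int) : List (Int × Int × Bool) → List (Int × Int × Bool)
  | [(s1, e1, st1), (s2, e2, st2)] =>
      if e2 - s2 < t ∧ st2 = false ∧ st1 = true then
        [(s1, e1, st1), (s2, e2, st1)]
      else [(s1, e1, st1), (s2, e2, st2)]
  | x :: y :: z :: rest => x :: adjustLastA t (y :: z :: rest)
  | xs => xs

-- one iteration of A's collapse loop; the accumulator is Python's `collapsed` REVERSED
-- (head = collapsed[-1]), reversed back at the end
def aStep (acc : List (Int × Int × Bool)) (run : Int × Int × Bool) : List (Int × Int × Bool) :=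
  match acc with
  | [] => [run]
  | (ps, pe, pst) :: restAcc =>
      if pst = run.2.2 ∧ run.1 ≤ pe then (ps, max pe run.2.1, pst) :: restAcc
      else if pst = run.2.2 then (ps, run.2.1, pst) :: restAcc
      else run :: (ps, pe, pst) :: restAcc

def absorb_short_edge_runs_py (runs : List (Int × Int × Bool)) (edge_threshold : Int) : List (Int × Int × Bool) :=
  if runs.length ≤ 1 then runs
  else ((adjustLastA edge_threshold (adjustFirstA edge_threshold runs)).foldl aStep []).reverse

-- ===== PORT B =====
-- B's promote_head helper: promote a short leading False run to its neighbour's True state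
def promoteB (t : Int) : List (Int × Int × Bool) → List (Int × Int × Bool)
  | (s, e, st) :: (s2, e2, nst) :: rest =>
      if e - s < t ∧ st = false ∧ nst = true then (s, e, nst) :: (s2, e2, nst) :: rest
      else (s, e, st) :: (s2, e2, nst) :: rest
  | xs => xs

-- B's splice loop: `pre` is adjusted[:i] (states already pairwise distinct there), the second
-- argument adjusted[i:]; a same-state pair at i is spliced into one run, else i advances
def spliceB (pre : List (Int × Int × Bool)) : List (Int × Int × Bool) → List (Int × Int × Bool)
  | (s1, e1, st1) :: (s2, e2, st2) :: rest =>
      if st1 = st2 then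
        spliceB pre ((s1, (if s2 ≤ e1 then max e1 e2 else e2), st1) :: rest)
      else spliceB (pre ++ [(s1, e1, st1)]) ((s2, e2, st2) :: rest)
  | xs => pre ++ xs
  termination_by xs => xs.length

def absorb_short_edge_runs_py_alt (runs : List (Int × Int × Bool)) (edge_threshold : Int) : List (Int × Int × Bool) :=
  if runs.length ≤ 1 then runs
  else spliceB [] ((promoteB edge_threshold ((promoteB edge_threshold runs).reverse)).reverse)

-- ===== PRECONDITION & SPEC =====
def Spec_absorb_short_edge_runs_py (runs : List (Int × Int × Bool)) (edge_threshold : Int) (out : List (Int × Int × Bool)) : Prop := out = absorb_short_edge_runs_py_alt runs edge_threshold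
instance (runs : List (Int × Int × Bool)) (edge_threshold : Int) (out : List (Int × Int × Bool)) : Decidable (Spec_absorb_short_edge_runs_py runs edge_threshold out) := by unfold Spec_absorb_short_edge_runs_py; infer_instance

-- ===== CLAIM (what is proved, stated in full; the proofs are below) =====
def Claim_equal_absorb_short_edge_runs_py : Prop := ∀ (runs : List (Int × Int × Bool)) (edge_threshold : Int), Dom_absorb_short_edge_runs_py runs edge_threshold → Spec_absorb_short_edge_runs_py runs edge_threshold (absorb_short_edge_runs_py runs edge_threshold)

-- ===== LEMMAS AND PROOFS =====

-- the two head fix-ups are the same function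
theorem promoteB_eq_adjustFirstA (t : Int) (xs : List (Int × Int × Bool)) :
    promoteB t xs = adjustFirstA t xs := by
  rcases xs with _ | ⟨⟨s, e, st⟩, _ | ⟨⟨s2, e2, st2⟩, rest⟩⟩ <;> rfl

-- the fixed-up last element, as a function of the ORIGINAL last two elements
def gLast (t : Int) (rm rl : Int × Int × Bool) : Int × Int × Bool :=
  if rl.2.1 - rl.1 < t ∧ rl.2.2 = false ∧ rm.2.2 = true then (rl.1, rl.2.1, true) else rl

theorem adjustLastA_pair (t : Int) (a b : Int × Int × Bool) :
    adjustLastA t [a, b] = [a, gLast t a b] := by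
  obtain ⟨s1, e1, st1⟩ := a; obtain ⟨s2, e2, st2⟩ := b
  simp only [adjustLastA, gLast]
  split_ifs <;> simp_all

theorem adjustLastA_cons (t : Int) (x : Int × Int × Bool) (l : List (Int × Int × Bool))
    (h : 2 ≤ l.length) : adjustLastA t (x :: l) = x :: adjustLastA t l := by
  rcases l with _ | ⟨y, _ | ⟨z, rest⟩⟩
  · simp at h
  · simp at h
  · rfl

theorem adjustLastA_append (t : Int) (xs : List (Int × Int × Bool)) (a b : Int × Int × Bool) :
    adjustLastA t (xs ++ [a, b]) = xs ++ [a, gLast t a b] := by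
  induction xs with
  | nil => simpa using adjustLastA_pair t a b
  | cons x xs ih =>
      rw [List.cons_append, adjustLastA_cons t x (xs ++ [a, b]) (by simp), ih, List.cons_append]

-- B's reverse/promote/reverse equals A's walk-to-the-end fix-up
theorem revPromote_eq_adjustLast (t : Int) (ys : List (Int × Int × Bool))
    (a b : Int × Int × Bool) :
    (promoteB t ((ys ++ [a, b]).reverse)).reverse = adjustLastA t (ys ++ [a, b]) := by
  obtain ⟨sa, ea, sta⟩ := a; obtain ⟨sb, eb, stb⟩ := b
  rw [adjustLastA_append]
  have hrev : ((ys ++ [(sa, ea, sta), (sb, eb, stb)]).reverse)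
      = (sb, eb, stb) :: (sa, ea, sta) :: ys.reverse := by simp
  rw [hrev]
  simp only [promoteB, gLast]
  split_ifs with h
  · obtain ⟨h1, h2, h3⟩ := h
    subst h2; subst h3
    simp
  · simp

-- every list of length ≥ 2 ends in two elements
theorem exists_concat2 (x y : Int × Int × Bool) (l : List (Int × Int × Bool)) :
    ∃ ys a b, x :: y :: l = ys ++ [a, b] := by
  induction l generalizing x y with
  | nil => exact ⟨[], x, y, rfl⟩
  | cons z l ih =>
      obtain ⟨ys, a, b, h⟩ := ih y z
      exact ⟨x :: ys, a, b, by rw [List.cons_append, ← h]⟩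

-- proof-only clean recursion: collapse by merging the first two runs when states agree
def cB : List (Int × Int × Bool) → List (Int × Int × Bool)
  | (s1, e1, st1) :: (s2, e2, st2) :: rest =>
      if st1 = st2 then cB ((s1, (if s2 ≤ e1 then max e1 e2 else e2), st1) :: rest)
      else (s1, e1, st1) :: cB ((s2, e2, st2) :: rest)
  | xs => xs
  termination_by xs => xs.length

-- B's splice loop is cB with the finished prefix carried along
theorem spliceB_eq_cB (pre xs : List (Int × Int × Bool)) : spliceB pre xs = pre ++ cB xs := by
  fun_induction spliceB pre xs with
  | case1 pre s1 e1 s2 e2 st rest ih =>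
      rw [cB, if_pos rfl]; exact ih
  | case2 pre s1 e1 st1 s2 e2 st2 rest h ih =>
      rw [cB, if_neg h, ih]; simp
  | case3 pre xs h =>
      rcases xs with _ | ⟨a, _ | ⟨b, l⟩⟩
      · simp [cB]
      · simp [cB]
      · exact (h a.1 a.2.1 a.2.2 b.1 b.2.1 b.2.2 l (by simp)).elim

-- A's collapse loop, run with accumulator head (s,e,st), is cB with the head merged in
theorem foldA_eq (xs : List (Int × Int × Bool)) :
    ∀ (s e : Int) (st : Bool) (acc : List (Int × Int × Bool)),
    List.foldl aStep ((s, e, st) :: acc) xs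
      = (cB ((s, e, st) :: xs)).reverse ++ acc := by
  induction xs with
  | nil => intro s e st acc; simp [cB]
  | cons x tl ih =>
      intro s e st acc
      obtain ⟨s2, e2, st2⟩ := x
      by_cases h : st = st2
      · by_cases hle : s2 ≤ e
        · rw [List.foldl_cons, show aStep ((s, e, st) :: acc) (s2, e2, st2)
              = (s, max e e2, st) :: acc by simp [aStep, h, hle], ih, cB]
          simp [h, hle]
        · rw [List.foldl_cons, show aStep ((s, e, st) :: acc) (s2, e2, st2)
              = (s, e2, st) :: acc by simp [aStep, h, hle], ih, cB]
          simp [h, hle]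
      · rw [List.foldl_cons, show aStep ((s, e, st) :: acc) (s2, e2, st2)
            = (s2, e2, st2) :: (s, e, st) :: acc by simp [aStep, h], ih, cB]
        simp [h]

-- whole-collapse equality: A's fold+reverse = B's splice loop
theorem collapseFold_eq (L : List (Int × Int × Bool)) :
    (List.foldl aStep [] L).reverse = spliceB [] L := by
  rcases L with _ | ⟨⟨s, e, st⟩, tl⟩
  · simp [spliceB]
  · rw [spliceB_eq_cB]
    have h0 : List.foldl aStep [] ((s, e, st) :: tl) = List.foldl aStep [(s, e, st)] tl := by
      simp [aStep]
    rw [h0, foldA_eq]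
    simp

-- ===== VERDICT (by name: the statement is the Claim_ definition above) =====
theorem absorb_short_edge_runs_py_spec : Claim_equal_absorb_short_edge_runs_py := by
  intro runs t _
  unfold Spec_absorb_short_edge_runs_py
  rcases runs with _ | ⟨r0, _ | ⟨r1, rest⟩⟩
  · rfl
  · rfl
  · have hlen : ¬ (r0 :: r1 :: rest).length ≤ 1 := by simp
    rw [absorb_short_edge_runs_py, absorb_short_edge_runs_py_alt, if_neg hlen, if_neg hlen,
        collapseFold_eq, promoteB_eq_adjustFirstA t (r0 :: r1 :: rest)]
    obtain ⟨r0', r1', rest', h1⟩ : ∃ g y l, adjustFirstA t (r0 :: r1 :: rest) = g :: y :: l := by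
      obtain ⟨s, e, st⟩ := r0; obtain ⟨s2, e2, st2⟩ := r1
      simp only [adjustFirstA]
      split_ifs <;> exact ⟨_, _, _, rfl⟩
    rw [h1]
    obtain ⟨ys, a, b, h2⟩ := exists_concat2 r0' r1' rest'
    rw [h2, revPromote_eq_adjustLast]
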